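-- pv_equiv track=rewrite | github.com/IlayTheProgrammer/Cryptography | Cryptography.py | __format_keyword
-- ===== SOURCE A (Python) =====
-- from copy import deepcopy
--
-- def __format_keyword(message: list[str], keyword: list[str]) -> list[str]:
--     keyword_copy: list[str] = deepcopy(keyword)
--
--     if len(keyword) < len(message):
--         iterator: int = 0
--
--         while len(keyword_copy) < len(message):
--             keyword_copy.append(keyword[iterator % len(keyword)])
--             iterator += 1
--
--     elif len(keyword) > len(message):
--
--         while len(keyword_copy) > len(message):
--             keyword_copy.pop(-1)
--
--     return keyword_copy
-- ===== SOURCE B (Python) =====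
-- def __format_keyword(message: list[str], keyword: list[str]) -> list[str]:
--     if len(keyword) < len(message):
--         n = -(-len(message) // len(keyword))
--         return (keyword * n)[:len(message)]
--     return keyword[:len(message)]
-- ===== Notes on version B (the rewrite author's own statement) =====
-- stated objective: simpler
-- what changed: Replaces the element-by-element while loops (append kw[i % len] until long enough; pop(-1) until short enough) with a closed form: ceil-divide, replicate the keyword, and slice to the message length.
import Mathlib
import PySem

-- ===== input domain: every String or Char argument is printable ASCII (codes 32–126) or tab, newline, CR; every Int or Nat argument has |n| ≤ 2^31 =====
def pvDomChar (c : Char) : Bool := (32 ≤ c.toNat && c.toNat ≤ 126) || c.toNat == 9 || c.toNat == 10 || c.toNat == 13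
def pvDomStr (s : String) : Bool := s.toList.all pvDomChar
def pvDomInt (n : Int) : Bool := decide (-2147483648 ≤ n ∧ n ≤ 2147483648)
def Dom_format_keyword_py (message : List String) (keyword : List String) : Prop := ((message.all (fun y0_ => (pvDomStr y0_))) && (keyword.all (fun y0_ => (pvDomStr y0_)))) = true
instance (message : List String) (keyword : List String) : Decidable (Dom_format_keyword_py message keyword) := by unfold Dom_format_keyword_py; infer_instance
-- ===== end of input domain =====

-- B replaces A's two element-by-element while loops by a closed form (ceil-divide,
-- replicate, slice); objective: simpler. Return-value equivalence only (A copies, no mutation).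

-- ===== PORT A =====
-- the `while len(keyword_copy) < len(message): append keyword[iterator % len(keyword)]` loop;
-- fuel = len(message) suffices since the copy grows by one each step (Pre_ rules out the
-- empty-keyword ZeroDivisionError case)
def aGrow (kw : List String) (msgLen : Nat) : Nat → List String → Int → List String
  | 0, copy, _ => copy
  | fuel + 1, copy, it =>
    if copy.length < msgLen then
      aGrow kw msgLen fuel (copy ++ [kw.getD (PySem.Int.mod it (kw.length : Int)).toNat ""]) (it + 1)
    else copy

-- the `while len(keyword_copy) > len(message): keyword_copy.pop(-1)` loop
def aShrink (msgLen : Nat) (copy : List String) : List String :=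
  if copy.length > msgLen then aShrink msgLen copy.dropLast else copy
termination_by copy.length
decreasing_by
  simp only [List.length_dropLast]
  omega

def format_keyword_py (message : List String) (keyword : List String) : List String :=
  let keyword_copy := keyword
  if keyword.length < message.length then
    aGrow keyword message.length message.length keyword_copy 0
  else if keyword.length > message.length then
    aShrink message.length keyword_copy
  else keyword_copy

-- ===== PORT B =====
def format_keyword_py_alt (message : List String) (keyword : List String) : List String :=
  if keyword.length < message.length then
    let n : Int := -(PySem.Int.floordiv (-(message.length : Int)) (keyword.length : Int))
    (List.flatten (List.replicate n.toNat keyword)).take message.length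
  else
    keyword.take message.length

-- ===== PRECONDITION & SPEC =====
-- Pre_ excludes only empty keyword with non-empty message, where A (and B) raise ZeroDivisionError.
def Pre_format_keyword_py (message : List String) (keyword : List String) : Prop :=
  keyword = [] → message = []
instance (message : List String) (keyword : List String) : Decidable (Pre_format_keyword_py message keyword) := by unfold Pre_format_keyword_py; infer_instance

def pvWitness_format_keyword_py : List String × List String := (["a", "b", "c"], ["k", "e"])

def Spec_format_keyword_py (message : List String) (keyword : List String) (out : List String) : Prop := out = format_keyword_py_alt message keyword
instance (message : List String) (keyword : List String) (out : List String) : Decidable (Spec_format_keyword_py message keyword out) := by unfold Spec_format_keyword_py; infer_instance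

-- ===== CLAIM (what is proved, stated in full; the proofs are below) =====
def Claim_equal_format_keyword_py : Prop := ∀ (message : List String) (keyword : List String), Dom_format_keyword_py message keyword → Pre_format_keyword_py message keyword → Spec_format_keyword_py message keyword (format_keyword_py message keyword)

-- ===== LEMMAS AND PROOFS =====

-- the periodic element function both sides compute
def pvF (kw : List String) (i : Nat) : String := kw.getD (i % kw.length) ""

lemma range_map_getD (kw : List String) :
    (List.range kw.length).map (fun j => kw.getD j "") = kw := by
  apply List.ext_getElem
  · simp
  · intro i h1 h2
    simp [List.getD_eq_getElem?_getD, h2]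

lemma range_map_pvF (kw : List String) :
    (List.range kw.length).map (pvF kw) = kw := by
  have h : (List.range kw.length).map (pvF kw)
      = (List.range kw.length).map (fun j => kw.getD j "") := by
    apply List.map_congr_left
    intro j hj
    simp only [List.mem_range] at hj
    simp [pvF, Nat.mod_eq_of_lt hj]
  rw [h, range_map_getD]

lemma flatten_replicate_pvF (kw : List String) :
    ∀ a : Nat, List.flatten (List.replicate a kw) = (List.range (a * kw.length)).map (pvF kw) := by
  intro a
  induction a with
  | zero => simp
  | succ a ih =>
    rw [List.replicate_succ', List.flatten_append, ih]
    have : (a + 1) * kw.length = a * kw.length + kw.length := by ring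
    rw [this, List.range_add, List.map_append]
    congr 1
    have : (List.range kw.length).map (fun j => pvF kw (a * kw.length + j))
        = (List.range kw.length).map (pvF kw) := by
      apply List.map_congr_left
      intro j hj
      simp only [List.mem_range] at hj
      simp [pvF]
    simp only [List.map_map] at *
    rw [show ((pvF kw) ∘ (fun j => a * kw.length + j)) = (fun j => pvF kw (a * kw.length + j)) from rfl] at *
    rw [this, range_map_pvF]
    simp

lemma grow_spec (kw : List String) (m : Nat) (hk : 0 < kw.length) :
    ∀ (fuel c : Nat), kw.length ≤ c → c ≤ m → m ≤ c + fuel →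
    aGrow kw m fuel ((List.range c).map (pvF kw)) ((c : Int) - kw.length)
      = (List.range m).map (pvF kw) := by
  intro fuel
  induction fuel with
  | zero =>
    intro c _ h2 h3
    have : c = m := by omega
    subst this
    rfl
  | succ fuel ih =>
    intro c h1 h2 h3
    rw [aGrow]
    simp only [List.length_map, List.length_range]
    by_cases hc : c < m
    · simp only [hc, if_true]
      have hmodeq : (PySem.Int.mod ((c : Int) - (kw.length : Int)) (kw.length : Int)).toNat
          = c % kw.length := by
        rw [PySem.Int.mod_eq_emod_of_pos (by exact_mod_cast hk : (0:Int) < (kw.length : Int))]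
        have : ((c : Int) - (kw.length : Int)) % (kw.length : Int) = (c : Int) % (kw.length : Int) :=
          Int.sub_emod_right _ _
        rw [this]
        have : ((c : Int) % (kw.length : Int)) = ((c % kw.length : Nat) : Int) := by
          push_cast; rfl
        rw [this]
        exact Int.toNat_natCast _
      have happ : (List.range c).map (pvF kw) ++ [kw.getD (PySem.Int.mod ((c : Int) - (kw.length : Int)) (kw.length : Int)).toNat ""]
          = (List.range (c + 1)).map (pvF kw) := by
        rw [List.range_succ, List.map_append, hmodeq]
        rfl
      rw [happ]
      have hit : (c : Int) - (kw.length : Int) + 1 = ((c + 1 : Nat) : Int) - (kw.length : Int) := by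
        push_cast; ring
      rw [hit]
      exact ih (c + 1) (by omega) (by omega) (by omega)
    · simp only [hc, if_false]
      have : c = m := by omega
      subst this
      rfl

lemma shrink_spec (m : Nat) : ∀ (l : List String), m ≤ l.length → aShrink m l = l.take m := by
  intro l
  induction l using aShrink.induct m with
  | case1 copy hgt ih =>
    intro _
    rw [aShrink, if_pos hgt, ih (by simp [List.length_dropLast]; omega)]
    rw [List.dropLast_eq_take, List.take_take]
    congr 1
    omega
  | case2 copy hle =>
    intro hm
    rw [aShrink, if_neg hle]
    have : copy.length = m := by omega
    rw [← this, List.take_length]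

lemma ceil_bound (m k : Nat) (hk : 0 < k) (hm : 0 < m) :
    m ≤ (-(PySem.Int.floordiv (-(m : Int)) (k : Int))).toNat * k := by
  set q : Int := -(PySem.Int.floordiv (-(m : Int)) (k : Int)) with hq
  have h := (PySem.Int.neg_floordiv_neg_eq_iff_of_pos (a := (m : Int)) (b := (k : Int))
      (by exact_mod_cast hk)).mp rfl
  obtain ⟨hlo, hhi⟩ := h
  rw [← hq] at hlo hhi
  have hq1 : 1 ≤ q := by nlinarith [hlo, hhi]
  have : (m : Int) ≤ q.toNat * k := by
    rwa [Int.toNat_of_nonneg (by omega)]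
  exact_mod_cast this

-- ===== VERDICT (by name: the statement is the Claim_ definition above) =====
theorem format_keyword_py_spec : Claim_equal_format_keyword_py := by
  intro message keyword _ hpre
  unfold Spec_format_keyword_py format_keyword_py format_keyword_py_alt
  by_cases hlt : keyword.length < message.length
  · simp only [hlt, if_true]
    have hk : 0 < keyword.length := by
      rcases Nat.eq_zero_or_pos keyword.length with h0 | h0
      · exfalso
        have : keyword = [] := List.length_eq_zero_iff.mp h0
        have := hpre this
        subst this
        simp at hlt
      · exact h0
    have hA : aGrow keyword message.length message.length keyword 0
        = (List.range message.length).map (pvF keyword) := by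
      have h0 : ((keyword.length : Nat) : Int) - (keyword.length : Int) = 0 := by ring
      have := grow_spec keyword message.length hk message.length keyword.length
        (le_refl _) (by omega) (by omega)
      rw [range_map_pvF, h0] at this
      exact this
    rw [hA, flatten_replicate_pvF]
    rw [← List.map_take, List.take_range]
    have hle := ceil_bound message.length keyword.length hk (by omega)
    rw [min_eq_left hle]
  · simp only [hlt, if_false]
    by_cases hgt : keyword.length > message.length
    · simp only [hgt, if_true]
      exact shrink_spec message.length keyword (by omega)
    · simp only [hgt, if_false]
      have : keyword.length = message.length := by omega
      rw [← this, List.take_length]
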